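-- pv_equiv track=rewrite | github.com/junglistloydee/infinitedungeon | infinitedungeon.py | remove_items_from_inventory
-- ===== SOURCE A (Python) =====
-- def remove_items_from_inventory(player_inventory, item_name, count):
--     """Removes a specified number of items from the player's inventory."""
--     removed_count = 0
--     items_to_keep = []
--     for item in player_inventory:
--         if item['name'].lower() == item_name.lower() and removed_count < count:
--             removed_count += 1
--         else:
--             items_to_keep.append(item)
--     player_inventory[:] = items_to_keep
--     return removed_count == count
-- ===== SOURCE B (Python) =====
-- def remove_items_from_inventory(player_inventory, item_name, count):
--     """Removes a specified number of items from the player's inventory."""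
--     target = item_name.lower()
--     matches = [i for i, item in enumerate(player_inventory) if item['name'].lower() == target]
--     drop = set(matches[:max(count, 0)])
--     player_inventory[:] = [item for i, item in enumerate(player_inventory) if i not in drop]
--     return len(drop) == count
-- ===== Notes on version B (the rewrite author's own statement) =====
-- stated objective: alternative
-- what changed: A interleaves matching, counting and list rebuilding in one stateful loop; B first collects the indices of matching items, drops the first (up to count, never a negative number) of them in a second filtering pass, and returns whether the number actually dropped equals the request.
import Mathlib
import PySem

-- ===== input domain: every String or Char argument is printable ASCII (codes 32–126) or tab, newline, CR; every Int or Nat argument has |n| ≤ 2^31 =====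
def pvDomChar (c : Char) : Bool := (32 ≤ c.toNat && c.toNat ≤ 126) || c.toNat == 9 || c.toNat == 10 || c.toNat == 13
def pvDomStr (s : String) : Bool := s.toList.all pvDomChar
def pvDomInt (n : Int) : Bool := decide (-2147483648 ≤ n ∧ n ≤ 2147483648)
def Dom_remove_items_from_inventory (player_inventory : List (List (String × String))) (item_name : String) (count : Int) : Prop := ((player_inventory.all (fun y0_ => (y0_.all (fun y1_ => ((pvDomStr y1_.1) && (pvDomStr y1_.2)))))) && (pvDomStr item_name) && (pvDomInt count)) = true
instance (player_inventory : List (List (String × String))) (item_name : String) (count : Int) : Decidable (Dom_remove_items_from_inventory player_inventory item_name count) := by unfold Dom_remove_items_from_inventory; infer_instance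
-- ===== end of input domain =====

-- B replaces A's single stateful loop (counter + keep-list) with a two-pass index-set
-- decomposition: collect matching indices, drop the first (up to count) of them, and
-- compare the number dropped with the request; objective: alternative decomposition.
-- Both A and B mutate player_inventory[:] identically; the equivalence proved here is about the RETURN value only.

-- ===== PORT A =====
def remove_items_from_inventory (player_inventory : List (List (String × String))) (item_name : String) (count : Int) : Bool :=
  -- state = (removed_count, items_to_keep); item['name'] is a first-match assoc lookup
  -- (Pre_ guarantees the key is present, so .getD "" never supplies its default)
  let st := player_inventory.foldl
    (fun (st : Int × List (List (String × String))) item =>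
      if PySem.Str.lower ((List.lookup "name" item).getD "") == PySem.Str.lower item_name
          && decide (st.1 < count)
      then (st.1 + 1, st.2)
      else (st.1, st.2 ++ [item]))
    (0, [])
  decide (st.1 = count)

-- ===== PORT B =====
def remove_items_from_inventory_alt (player_inventory : List (List (String × String))) (item_name : String) (count : Int) : Bool :=
  -- (the in-place rebuild of Source B only mutates the list; the return value uses drop and count)
  let target := PySem.Str.lower item_name
  let idxs := ((PySem.List.enumerate player_inventory 0).filter
      (fun p => PySem.Str.lower ((List.lookup "name" p.2).getD "") == target)).map (·.1)
  let drop := PySem.Set.ofList (PySem.List.slice idxs none (some (max count 0)))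
  decide ((drop.length : Int) = count)

-- ===== PRECONDITION & SPEC =====
-- Pre_ excludes only inventories containing an item without a 'name' key, on which A raises KeyError.
def Pre_remove_items_from_inventory (player_inventory : List (List (String × String))) (item_name : String) (count : Int) : Prop :=
  ∀ item ∈ player_inventory, (List.lookup "name" item).isSome = true
instance (player_inventory : List (List (String × String))) (item_name : String) (count : Int) : Decidable (Pre_remove_items_from_inventory player_inventory item_name count) := by unfold Pre_remove_items_from_inventory; infer_instance

def pvWitness_remove_items_from_inventory : (List (List (String × String))) × String × Int :=
  ([[("name", "Sword")], [("name", "shield"), ("value", "3")]], "sword", 1)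

def Spec_remove_items_from_inventory (player_inventory : List (List (String × String))) (item_name : String) (count : Int) (out : Bool) : Prop := out = remove_items_from_inventory_alt player_inventory item_name count
instance (player_inventory : List (List (String × String))) (item_name : String) (count : Int) (out : Bool) : Decidable (Spec_remove_items_from_inventory player_inventory item_name count out) := by unfold Spec_remove_items_from_inventory; infer_instance

-- ===== CLAIM (what is proved, stated in full; the proofs are below) =====
def Claim_equal_remove_items_from_inventory : Prop := ∀ (player_inventory : List (List (String × String))) (item_name : String) (count : Int), Dom_remove_items_from_inventory player_inventory item_name count → Pre_remove_items_from_inventory player_inventory item_name count → Spec_remove_items_from_inventory player_inventory item_name count (remove_items_from_inventory player_inventory item_name count)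

-- ===== LEMMAS AND PROOFS =====

-- the second component of A's state never influences the counter
theorem pv_fst_foldl (P : List (String × String) → Bool) (count : Int)
    (inv : List (List (String × String))) :
    ∀ (r : Int) (acc : List (List (String × String))),
    (inv.foldl (fun (st : Int × List (List (String × String))) item =>
        if P item && decide (st.1 < count) then (st.1 + 1, st.2)
        else (st.1, st.2 ++ [item])) (r, acc)).1
    = inv.foldl (fun (r : Int) item => if P item && decide (r < count) then r + 1 else r) r := by
  induction inv with
  | nil => intro r acc; rfl
  | cons x xs ih =>
      intro r acc
      show (xs.foldl _ (if P x && decide (r < count) then (r + 1, acc) else (r, acc ++ [x]))).1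
         = xs.foldl _ (if P x && decide (r < count) then r + 1 else r)
      by_cases h : (P x && decide (r < count)) = true
      · rw [if_pos h, if_pos h]; exact ih _ _
      · rw [if_neg h, if_neg h]; exact ih _ _

-- closed form for A's counter loop
theorem pv_counter_closed (P : List (String × String) → Bool) (count : Int)
    (inv : List (List (String × String))) :
    ∀ (r : Int),
    inv.foldl (fun (r : Int) item => if P item && decide (r < count) then r + 1 else r) r
    = max r (min count (r + (inv.countP P : Int))) := by
  induction inv with
  | nil => intro r; simp
  | cons x xs ih =>
      intro r
      have h0 : (0 : Int) ≤ (xs.countP P : Int) := Int.natCast_nonneg _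
      show xs.foldl _ (if P x && decide (r < count) then r + 1 else r)
         = max r (min count (r + ((x :: xs).countP P : Int)))
      by_cases hp : P x = true
      · rw [List.countP_cons, if_pos hp]
        by_cases hr : r < count
        · rw [if_pos (by simp [hp, hr]), ih]; push_cast; omega
        · rw [if_neg (by simp [hr]), ih]; push_cast; omega
      · rw [List.countP_cons, if_neg hp, if_neg (by simp [hp]), ih]
        simp

-- filtering an enumeration by a predicate on the element counts the matching elements
theorem pv_enum_filter_length (P : List (String × String) → Bool)
    (inv : List (List (String × String))) :
    ∀ (s : Int),
    ((PySem.List.enumerate inv s).filter (fun p => P p.2)).length = inv.countP P := by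
  induction inv with
  | nil => intro s; simp [PySem.List.enumerate_nil]
  | cons x xs ih =>
      intro s
      rw [PySem.List.enumerate_cons]
      by_cases hp : P x = true
      · simp [hp, ih]
      · simp [hp, ih]

-- the indices B collects are pairwise distinct
theorem pv_matches_nodup (P : List (String × String) → Bool)
    (inv : List (List (String × String))) (s : Int) :
    (((PySem.List.enumerate inv s).filter (fun p => P p.2)).map (·.1)).Nodup := by
  have hsub : ((PySem.List.enumerate inv s).filter (fun p => P p.2)).Sublist
      (PySem.List.enumerate inv s) := List.filter_sublist ..
  have hmap := List.Sublist.map (·.1) hsub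
  have hnodup : ((PySem.List.enumerate inv s).map (·.1)).Nodup := by
    rw [PySem.List.map_fst_enumerate]
    exact PySem.List.nodup_pyRange_one _ _
  exact hnodup.sublist hmap

-- ===== VERDICT (by name: the statement is the Claim_ definition above) =====
theorem remove_items_from_inventory_spec : Claim_equal_remove_items_from_inventory := by
  intro inv item_name count _ _
  unfold Spec_remove_items_from_inventory
  unfold remove_items_from_inventory remove_items_from_inventory_alt
  set P : List (String × String) → Bool :=
    fun item => PySem.Str.lower ((List.lookup "name" item).getD "") == PySem.Str.lower item_name with hP
  simp only []
  set idxs := ((PySem.List.enumerate inv 0).filter (fun p => P p.2)).map (·.1) with hm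
  have hlen : idxs.length = inv.countP P := by
    rw [hm, List.length_map, pv_enum_filter_length]
  have hnd : (PySem.List.slice idxs none (some (max count 0))).Nodup := by
    rw [PySem.List.slice_to idxs (le_max_right count 0)]
    exact (pv_matches_nodup P inv 0).sublist (List.take_sublist _ _)
  rw [pv_fst_foldl P count inv 0 [], pv_counter_closed P count inv 0]
  have hof := PySem.Set.ofList_eq_self_of_nodup _ hnd
  rw [hof, PySem.List.slice_to idxs (le_max_right count 0)]
  have htake : ((idxs.take (max count 0).toNat).length : Int)
      = min ((max count 0).toNat : Int) (inv.countP P : Int) := by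
    rw [List.length_take, hlen]; push_cast; omega
  rw [decide_eq_decide, htake]
  have h0 : (0 : Int) ≤ (inv.countP P : Int) := Int.natCast_nonneg _
  omega
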